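-- pv_equiv track=rewrite | github.com/Priyanshu13104/DAA | Greedy Algorithms/8.candies.py | candy_price
-- ===== SOURCE A (Python) =====
-- def candy_price(candies :list[int], k:int)->[int, int]:
--     candies.sort()
--     # compute min price
--     N = len(candies)
--     min_p = 0
--     buy = 0
--     free = N - 1
--     while buy <= free:
--         min_p += candies[buy]
--         buy += 1
--         free -= k
--
--     # compute max price
--     max_p = 0
--     buy2 = N - 1
--     free2 = 0
--     while buy2 >= free2:
--         max_p += candies[buy2]
--         free2 += 1
--         buy2 -= 1
--
--     return min_p, max_p
-- ===== SOURCE B (Python) =====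
-- def candy_price(candies: list[int], k: int) -> [int, int]:
--     # Closed-form greedy: pay for a prefix (min) and a suffix (max) of the sorted list.
--     # Sorts `candies` in place, like the original.
--     candies.sort()
--     if not candies:
--         return 0, 0
--     n = len(candies)
--     t_min = (n - 1) // (k + 1) + 1
--     t_max = (n - 1) // 2 + 1
--     return sum(candies[:t_min]), sum(candies[n - t_max:])
-- ===== Notes on version B (the rewrite author's own statement) =====
-- stated objective: simpler
-- what changed: Replaces A's two pointer-stepping while loops over the sorted list by closed-form ticket counts ((n-1)//(k+1)+1 paid for the minimum, (n-1)//2+1 for the maximum) and two bulk slice sums.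
import Mathlib
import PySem

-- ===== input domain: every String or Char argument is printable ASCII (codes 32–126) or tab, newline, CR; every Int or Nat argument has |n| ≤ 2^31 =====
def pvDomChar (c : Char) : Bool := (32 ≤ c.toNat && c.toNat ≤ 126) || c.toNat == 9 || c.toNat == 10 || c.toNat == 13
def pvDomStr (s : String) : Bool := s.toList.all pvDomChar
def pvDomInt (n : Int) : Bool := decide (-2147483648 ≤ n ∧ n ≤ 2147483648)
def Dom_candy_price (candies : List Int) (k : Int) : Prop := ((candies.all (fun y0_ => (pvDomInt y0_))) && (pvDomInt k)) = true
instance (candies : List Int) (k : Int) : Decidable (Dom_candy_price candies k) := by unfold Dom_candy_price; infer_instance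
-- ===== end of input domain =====

-- B replaces A's two pointer-stepping while loops by closed-form ticket counts and two
-- bulk slice sums (objective: simpler). Both sort `candies` in place in Python; the
-- equivalence proved here is about the return value.

-- ===== PORT A =====
-- while buy <= free: min_p += candies[buy]; buy += 1; free -= k
-- (fuel is a totality guard only; inside Pre_ the loop makes at most len+1 iterations)
def candyMinLoop (candies : List Int) (k : Int) : Nat → Int → Int → Int → Int
  | 0, min_p, _, _ => min_p
  | fuel + 1, min_p, buy, free =>
    if buy ≤ free then
      match PySem.List.pyGet? candies buy with
      | some v => candyMinLoop candies k fuel (min_p + v) (buy + 1) (free - k)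
      | none => min_p   -- IndexError (only reachable outside Pre_)
    else min_p

-- while buy2 >= free2: max_p += candies[buy2]; free2 += 1; buy2 -= 1
def candyMaxLoop (candies : List Int) : Nat → Int → Int → Int → Int
  | 0, max_p, _, _ => max_p
  | fuel + 1, max_p, buy2, free2 =>
    if free2 ≤ buy2 then
      match PySem.List.pyGet? candies buy2 with
      | some v => candyMaxLoop candies fuel (max_p + v) (buy2 - 1) (free2 + 1)
      | none => max_p
    else max_p

def candy_price (candies : List Int) (k : Int) : Int × Int :=
  let s := PySem.List.sorted candies (fun x => x) false
  let N : Int := s.length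
  (candyMinLoop s k (s.length + 1) 0 0 (N - 1),
   candyMaxLoop s (s.length + 1) 0 (N - 1) 0)

-- ===== PORT B =====
def candy_price_alt (candies : List Int) (k : Int) : Int × Int :=
  let s := PySem.List.sorted candies (fun x => x) false
  if s = [] then (0, 0)
  else
    let n : Int := s.length
    let t_min := PySem.Int.floordiv (n - 1) (k + 1) + 1
    let t_max := PySem.Int.floordiv (n - 1) 2 + 1
    ((PySem.List.slice s none (some t_min)).sum,
     (PySem.List.slice s (some (n - t_max)) none).sum)

-- ===== PRECONDITION & SPEC =====
-- Pre_ excludes negative k with a nonempty list: there A's first loop walks past the end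
-- of the list and raises IndexError (it never returns a value).
def Pre_candy_price (candies : List Int) (k : Int) : Prop := 0 ≤ k ∨ candies = []
instance (candies : List Int) (k : Int) : Decidable (Pre_candy_price candies k) := by
  unfold Pre_candy_price; infer_instance

def pvWitness_candy_price : List Int × Int := ([3, 1, 2], 1)

def Spec_candy_price (candies : List Int) (k : Int) (out : Int × Int) : Prop := out = candy_price_alt candies k
instance (candies : List Int) (k : Int) (out : Int × Int) : Decidable (Spec_candy_price candies k out) := by unfold Spec_candy_price; infer_instance

-- ===== CLAIM (what is proved, stated in full; the proofs are below) =====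
def Claim_equal_candy_price : Prop := ∀ (candies : List Int) (k : Int), Dom_candy_price candies k → Pre_candy_price candies k → Spec_candy_price candies k (candy_price candies k)

-- ===== LEMMAS AND PROOFS =====

theorem candyMinLoop_eq (s : List Int) (k : Int) (hk : 0 ≤ k) :
    ∀ (fuel : Nat) (acc : Int) (b : Nat) (free : Int),
      (b : Int) ≤ free →
      b + ((free - b).toNat / (k + 1).toNat + 1) ≤ s.length →
      (free - b).toNat / (k + 1).toNat + 1 ≤ fuel →
      candyMinLoop s k fuel acc b free =
        acc + ((s.drop b).take ((free - b).toNat / (k + 1).toNat + 1)).sum := by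
  intro fuel
  induction fuel with
  | zero => intro acc b free _ _ h3; exact absurd h3 (Nat.not_succ_le_zero _)
  | succ f ih =>
    intro acc b free h1 h2 h3
    have hb : b < s.length :=
      Nat.lt_of_lt_of_le (Nat.lt_add_of_pos_right (Nat.succ_pos _)) h2
    have hK : 0 < (k + 1).toNat := by omega
    have hdrop : s.drop b = s[b] :: s.drop (b + 1) := (List.getElem_cons_drop hb).symm
    have hget : PySem.List.pyGet? s ((b : Nat) : Int) = some s[b] := by
      rw [PySem.List.pyGet?_natCast]; exact List.getElem?_eq_getElem hb
    have hstep : candyMinLoop s k (f + 1) acc (b : Int) free =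
        candyMinLoop s k f (acc + s[b]) ((b : Int) + 1) (free - k) := by
      simp only [candyMinLoop, if_pos h1, hget]
    by_cases hd : (free - (b : Int)).toNat < (k + 1).toNat
    · have hcnt : (free - (b : Int)).toNat / (k + 1).toNat = 0 := Nat.div_eq_of_lt hd
      have hstop : ¬ ((b : Int) + 1 ≤ free - k) := by omega
      have hrest : ∀ acc' : Int, candyMinLoop s k f acc' ((b : Int) + 1) (free - k) = acc' := by
        intro acc'
        cases f with
        | zero => rfl
        | succ f' => simp [candyMinLoop, hstop]
      rw [hstep, hrest, hcnt, hdrop, List.take_succ_cons, List.take_zero, List.sum_cons,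
        List.sum_nil]
      ring
    · push_neg at hd
      have e1 : (free - k - ((b : Int) + 1)).toNat = (free - (b : Int)).toNat - (k + 1).toNat := by
        omega
      have hdiv : (free - (b : Int)).toNat / (k + 1).toNat =
          ((free - (b : Int)).toNat - (k + 1).toNat) / (k + 1).toNat + 1 :=
        Nat.div_eq_sub_div hK hd
      have hcast : (((b + 1 : Nat)) : Int) = (b : Int) + 1 := by push_cast; ring
      have hrec := ih (acc + s[b]) (b + 1) (free - k)
        (by rw [hcast]; omega)
        (by rw [hcast, e1]; rw [hdiv] at h2; omega)
        (by rw [hcast, e1]; rw [hdiv] at h3; omega)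
      rw [hcast] at hrec
      rw [hstep, hrec, e1, hdiv, hdrop, List.take_succ_cons, List.sum_cons]
      ring

theorem candyMaxLoop_eq (s : List Int) :
    ∀ (fuel : Nat) (acc : Int) (b2 : Nat) (f2 : Int),
      0 ≤ f2 → f2 ≤ (b2 : Int) → b2 < s.length →
      ((b2 : Int) - f2).toNat / 2 + 1 ≤ fuel →
      candyMaxLoop s fuel acc b2 f2 =
        acc + ((s.drop (b2 + 1 - (((b2 : Int) - f2).toNat / 2 + 1))).take (((b2 : Int) - f2).toNat / 2 + 1)).sum := by
  intro fuel
  induction fuel with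
  | zero => intro acc b2 f2 _ _ _ h4; exact absurd h4 (Nat.not_succ_le_zero _)
  | succ f ih =>
    intro acc b2 f2 h0 h1 hb h4
    have hget : PySem.List.pyGet? s ((b2 : Nat) : Int) = some s[b2] := by
      rw [PySem.List.pyGet?_natCast]; exact List.getElem?_eq_getElem hb
    have hstep : candyMaxLoop s (f + 1) acc (b2 : Int) f2 =
        candyMaxLoop s f (acc + s[b2]) ((b2 : Int) - 1) (f2 + 1) := by
      simp only [candyMaxLoop, if_pos h1, hget]
    by_cases hd : ((b2 : Int) - f2).toNat < 2
    · have hcnt : ((b2 : Int) - f2).toNat / 2 = 0 := Nat.div_eq_of_lt hd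
      have hstop : ¬ (f2 + 1 ≤ (b2 : Int) - 1) := by omega
      have hrest : ∀ acc' : Int, candyMaxLoop s f acc' ((b2 : Int) - 1) (f2 + 1) = acc' := by
        intro acc'
        cases f with
        | zero => rfl
        | succ f' => simp [candyMaxLoop, hstop]
      have hdropb : s.drop b2 = s[b2] :: s.drop (b2 + 1) := (List.getElem_cons_drop hb).symm
      rw [hstep, hrest, hcnt]
      have hp : b2 + 1 - (0 + 1) = b2 := by omega
      rw [hp, hdropb, List.take_succ_cons, List.take_zero, List.sum_cons, List.sum_nil]
      ring
    · push_neg at hd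
      have hb2 : 2 ≤ b2 := by omega
      have hcast : (((b2 - 1 : Nat)) : Int) = (b2 : Int) - 1 := by omega
      have hdiv : ((b2 : Int) - f2).toNat / 2 = (((b2 : Int) - f2).toNat - 2) / 2 + 1 :=
        Nat.div_eq_sub_div (by omega) hd
      have hrec := ih (acc + s[b2]) (b2 - 1) (f2 + 1)
        (by omega) (by omega) (by omega) (by omega)
      rw [hcast] at hrec
      have e1 : (((b2 : Int) - 1 - (f2 + 1))).toNat = ((b2 : Int) - f2).toNat - 2 := by omega
      rw [e1] at hrec
      have hcle : (((b2 : Int) - f2).toNat - 2) / 2 + 1 ≤ b2 := by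
        have hds := Nat.div_le_self (((b2 : Int) - f2).toNat - 2) 2
        omega
      rw [hstep, hrec, hdiv]
      have hp : b2 - 1 + 1 - ((((b2 : Int) - f2).toNat - 2) / 2 + 1) =
          b2 - ((((b2 : Int) - f2).toNat - 2) / 2 + 1) := by omega
      have hp2 : b2 + 1 - ((((b2 : Int) - f2).toNat - 2) / 2 + 1 + 1) =
          b2 - ((((b2 : Int) - f2).toNat - 2) / 2 + 1) := by omega
      rw [hp, hp2]
      generalize hX : (((b2 : Int) - f2).toNat - 2) / 2 + 1 = X at hcle
      have hidx : (s.drop (b2 - X))[X]? = some s[b2] := by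
        rw [List.getElem?_drop]
        have hbe : b2 - X + X = b2 := by omega
        rw [hbe, List.getElem?_eq_getElem hb]
      have hsplit : (s.drop (b2 - X)).take (X + 1) = (s.drop (b2 - X)).take X ++ [s[b2]] := by
        rw [List.take_succ]
        simp [hidx]
      rw [hsplit, List.sum_append]
      simp
      ring

-- ===== VERDICT (by name: the statement is the Claim_ definition above) =====
theorem candy_price_spec : Claim_equal_candy_price := by
  unfold Claim_equal_candy_price
  intro candies k _ hpre
  unfold Spec_candy_price candy_price candy_price_alt
  by_cases hc : PySem.List.sorted candies (fun x => x) false = []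
  · simp [hc, candyMinLoop, candyMaxLoop]
  · have hk : 0 ≤ k := by
      rcases hpre with h | h
      · exact h
      · exact absurd (by rw [h]; rfl) hc
    set s := PySem.List.sorted candies (fun x => x) false with hs
    have hlen : 0 < s.length := List.length_pos_iff.mpr hc
    have hK : 0 < (k + 1).toNat := by omega
    rw [if_neg hc]
    show (candyMinLoop s k (s.length + 1) 0 0 ((s.length : Int) - 1),
          candyMaxLoop s (s.length + 1) 0 ((s.length : Int) - 1) 0) =
        ((PySem.List.slice s none (some (PySem.Int.floordiv ((s.length : Int) - 1) (k + 1) + 1))).sum,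
         (PySem.List.slice s (some ((s.length : Int) - (PySem.Int.floordiv ((s.length : Int) - 1) 2 + 1))) none).sum)
    -- min side
    have hmin := candyMinLoop_eq s k hk (s.length + 1) 0 0 ((s.length : Int) - 1)
      (by simp only [Nat.cast_zero]; omega)
      (by
        have hds := Nat.div_le_self (((s.length : Int) - 1 - ((0 : Nat) : Int)).toNat) (k + 1).toNat
        omega)
      (by
        have hds := Nat.div_le_self (((s.length : Int) - 1 - ((0 : Nat) : Int)).toNat) (k + 1).toNat
        omega)
    simp only [Nat.cast_zero, sub_zero, List.drop_zero, zero_add] at hmin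
    have htn : ((s.length : Int) - 1).toNat = s.length - 1 := by omega
    rw [htn] at hmin
    have hfd1 : PySem.Int.floordiv ((s.length : Int) - 1) (k + 1) + 1 =
        (((s.length - 1) / (k + 1).toNat + 1 : Nat) : Int) := by
      have ha : ((s.length : Int) - 1) = ((s.length - 1 : Nat) : Int) := by omega
      have hb2 : (k + 1) = (((k + 1).toNat : Nat) : Int) := by omega
      rw [ha, hb2, PySem.Int.floordiv_natCast]
      exact (Nat.cast_add_one _).symm
    have hslice1 : PySem.List.slice s none (some (PySem.Int.floordiv ((s.length : Int) - 1) (k + 1) + 1)) =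
        s.take ((s.length - 1) / (k + 1).toNat + 1) := by
      rw [hfd1, PySem.List.slice_to_natCast]
    -- max side
    have hmax := candyMaxLoop_eq s (s.length + 1) 0 (s.length - 1) 0
      (le_refl 0) (by omega) (by omega) (by omega)
    rw [sub_zero] at hmax
    have hb2c : (((s.length - 1 : Nat)) : Int) = (s.length : Int) - 1 := by omega
    rw [hb2c] at hmax
    rw [htn] at hmax
    have hp : s.length - 1 + 1 - ((s.length - 1) / 2 + 1) = s.length - ((s.length - 1) / 2 + 1) := by
      omega
    rw [hp] at hmax
    have htake : (s.drop (s.length - ((s.length - 1) / 2 + 1))).take ((s.length - 1) / 2 + 1) =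
        s.drop (s.length - ((s.length - 1) / 2 + 1)) := by
      apply List.take_of_length_le
      rw [List.length_drop]
      omega
    rw [htake] at hmax
    have hfd2 : (s.length : Int) - (PySem.Int.floordiv ((s.length : Int) - 1) 2 + 1) =
        ((s.length - ((s.length - 1) / 2 + 1) : Nat) : Int) := by
      have ha : ((s.length : Int) - 1) = ((s.length - 1 : Nat) : Int) := by omega
      have hb3 : (2 : Int) = ((2 : Nat) : Int) := rfl
      rw [ha, hb3, PySem.Int.floordiv_natCast]
      omega
    have hslice2 : PySem.List.slice s (some ((s.length : Int) - (PySem.Int.floordiv ((s.length : Int) - 1) 2 + 1))) none =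
        s.drop (s.length - ((s.length - 1) / 2 + 1)) := by
      rw [hfd2, PySem.List.slice_from_natCast]
    rw [hmin, hmax, hslice1, hslice2]
    simp
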